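-- pv_equiv track=rewrite | github.com/yale-nlp/TAIL | tail_test/benchmark_generation.py | find_sublist_index_by_position
-- ===== SOURCE A (Python) =====
-- def find_sublist_index_by_position(nested_list, position):
--     current_position = 0
--     for i, sublist in enumerate(nested_list):
--         for _ in sublist:
--             if current_position == position:
--                 return i
--             current_position += 1
--     return -1
-- ===== SOURCE B (Python) =====
-- def find_sublist_index_by_position(nested_list, position):
--     start = 0
--     for i, sublist in enumerate(nested_list):
--         end = start + len(sublist)
--         if start <= position < end:
--             return i
--         start = end
--     return -1
-- ===== Notes on version B (the rewrite author's own statement) =====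
-- stated objective: faster
-- what changed: B compares position against running length boundaries per sublist instead of A's element-by-element counter scan.
import Mathlib
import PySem

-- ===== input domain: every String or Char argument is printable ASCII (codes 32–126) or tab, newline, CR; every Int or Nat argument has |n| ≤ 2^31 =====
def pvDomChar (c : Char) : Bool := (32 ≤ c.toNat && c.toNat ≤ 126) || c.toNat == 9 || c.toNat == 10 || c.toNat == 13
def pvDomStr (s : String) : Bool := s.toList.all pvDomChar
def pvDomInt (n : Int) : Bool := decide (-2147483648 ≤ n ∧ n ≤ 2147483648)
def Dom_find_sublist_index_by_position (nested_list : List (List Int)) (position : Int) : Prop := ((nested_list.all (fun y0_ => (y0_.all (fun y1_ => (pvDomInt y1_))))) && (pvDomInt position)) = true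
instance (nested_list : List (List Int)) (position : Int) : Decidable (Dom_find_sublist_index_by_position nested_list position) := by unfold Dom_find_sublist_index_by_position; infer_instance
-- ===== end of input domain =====

-- B replaces A's element-by-element counter scan by per-sublist running length boundaries (objective: faster).

-- ===== PORT A =====
-- inner loop over a sublist: `some c` = fell through with counter c, `none` = returned (found)
def pvInnerA (sub : List Int) (cur pos : Int) : Option Int :=
  match sub with
  | [] => some cur
  | _ :: t => if cur = pos then none else pvInnerA t (cur + 1) pos

def pvGoA (l : List (List Int)) (i cur pos : Int) : Int :=
  match l with
  | [] => -1
  | s :: r =>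
    match pvInnerA s cur pos with
    | none => i
    | some c => pvGoA r (i + 1) c pos

def find_sublist_index_by_position (nested_list : List (List Int)) (position : Int) : Int :=
  pvGoA nested_list 0 0 position

-- ===== PORT B =====
def pvGoB (l : List (List Int)) (i start pos : Int) : Int :=
  match l with
  | [] => -1
  | s :: r =>
    let e := start + (s.length : Int)
    if start ≤ pos ∧ pos < e then i else pvGoB r (i + 1) e pos

def find_sublist_index_by_position_alt (nested_list : List (List Int)) (position : Int) : Int :=
  pvGoB nested_list 0 0 position

-- ===== PRECONDITION & SPEC =====
def Spec_find_sublist_index_by_position (nested_list : List (List Int)) (position : Int) (out : Int) : Prop := out = find_sublist_index_by_position_alt nested_list position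
instance (nested_list : List (List Int)) (position : Int) (out : Int) : Decidable (Spec_find_sublist_index_by_position nested_list position out) := by unfold Spec_find_sublist_index_by_position; infer_instance

-- ===== CLAIM (what is proved, stated in full; the proofs are below) =====
def Claim_equal_find_sublist_index_by_position : Prop := ∀ (nested_list : List (List Int)) (position : Int), Dom_find_sublist_index_by_position nested_list position → Spec_find_sublist_index_by_position nested_list position (find_sublist_index_by_position nested_list position)

-- ===== LEMMAS AND PROOFS =====
theorem pvInnerA_eq (sub : List Int) (cur pos : Int) :
    pvInnerA sub cur pos =
      if cur ≤ pos ∧ pos < cur + (sub.length : Int) then none else some (cur + (sub.length : Int)) := by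
  induction sub generalizing cur with
  | nil =>
    simp only [pvInnerA, List.length_nil, Int.natCast_zero, add_zero]
    rw [if_neg (by omega)]
  | cons h t ih =>
    simp only [pvInnerA, ih, List.length_cons]
    push_cast
    split_ifs <;> first | rfl | omega | (simp only [Option.some.injEq]; omega)

theorem pvGo_eq (l : List (List Int)) (i cur pos : Int) :
    pvGoA l i cur pos = pvGoB l i cur pos := by
  induction l generalizing i cur with
  | nil => rfl
  | cons s r ih =>
    simp only [pvGoA, pvGoB, pvInnerA_eq]
    split_ifs <;> simp_all

-- ===== VERDICT (by name: the statement is the Claim_ definition above) =====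
theorem find_sublist_index_by_position_spec : Claim_equal_find_sublist_index_by_position := by
  intro nl pos _
  unfold Spec_find_sublist_index_by_position find_sublist_index_by_position find_sublist_index_by_position_alt
  exact pvGo_eq nl 0 0 pos
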